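-- pv_equiv track=rewrite | github.com/Lemi-in/Codeforces-daily | F_Binary_Substrings_with_Exactly_k_Ones.py | count
-- ===== SOURCE A (Python) =====
-- def count(s, k):
--     ans = 0
--     l = 0
--     n = len(s)
--     cnt = 0
--
--     for r in range(n):
--         if s[r] == '1':
--             cnt += 1
--         while l <= r and cnt > k:
--             if s[l] == '1':
--                 cnt -= 1
--             l += 1
--         ans += (r - l + 1)
--
--     return ans
-- ===== SOURCE B (Python) =====
-- def count(s, k):
--     n = len(s)
--     P = [0] * (n + 1)
--     for i in range(n):
--         P[i + 1] = P[i] + (1 if s[i] == '1' else 0)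
--     ans = 0
--     for r in range(n):
--         target = P[r + 1] - k
--         lo, hi = 0, r + 1
--         while lo < hi:
--             mid = (lo + hi) // 2
--             if P[mid] < target:
--                 lo = mid + 1
--             else:
--                 hi = mid
--         ans += (r + 1) - lo
--     return ans
-- ===== Notes on version B (the rewrite author's own statement) =====
-- stated objective: alternative
-- what changed: replaces the incremental left-pointer window shrinking with a prefix-sum table of ones queried by a hand-written bisect_left binary search for each right endpoint
import Mathlib
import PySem

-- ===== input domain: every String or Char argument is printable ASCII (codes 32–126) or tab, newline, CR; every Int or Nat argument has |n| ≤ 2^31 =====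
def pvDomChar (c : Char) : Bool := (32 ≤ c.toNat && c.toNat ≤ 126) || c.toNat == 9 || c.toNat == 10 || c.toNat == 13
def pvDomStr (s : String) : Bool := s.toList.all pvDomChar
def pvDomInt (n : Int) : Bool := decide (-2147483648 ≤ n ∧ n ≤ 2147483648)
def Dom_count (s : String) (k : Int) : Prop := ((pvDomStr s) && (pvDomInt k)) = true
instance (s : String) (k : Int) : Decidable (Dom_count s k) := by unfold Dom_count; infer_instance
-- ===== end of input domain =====

-- B replaces A's incremental window shrinking by a prefix-sum table queried with binary
-- search per right endpoint (objective: alternative; not faster).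

-- ===== PORT A =====
-- the inner `while l <= r and cnt > k` loop of A
def shrinkA (cs : List Char) (k : Int) (r : Nat) (l : Nat) (cnt : Int) : Nat × Int :=
  if h : l ≤ r ∧ k < cnt then
    shrinkA cs k r (l + 1) (if cs.getD l ' ' = '1' then cnt - 1 else cnt)
  else (l, cnt)
termination_by r + 1 - l
decreasing_by omega

-- per-r body of A's for-loop; state = (ans, l, cnt)
def stepA (cs : List Char) (k : Int) (st : Int × Nat × Int) (r : Nat) : Int × Nat × Int :=
  let cnt := if cs.getD r ' ' = '1' then st.2.2 + 1 else st.2.2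
  let p := shrinkA cs k r st.2.1 cnt
  (st.1 + ((r : Int) - (p.1 : Int) + 1), p.1, p.2)

-- s[r]/s[l] ported via List.getD on s.toList: exact here, every index A reads is in range
def count (s : String) (k : Int) : Int :=
  ((List.range s.toList.length).foldl (stepA s.toList k) (0, 0, 0)).1

-- ===== PORT B =====
-- Source B's prefix-sum building loop (P[i+1] = P[i] + bit) is exactly a scanl
def prefB (cs : List Char) : List Int :=
  List.scanl (fun a c => a + (if c = '1' then 1 else 0)) 0 cs

-- Source B's hand-written bisect_left while-loop
def bisectB (P : List Int) (t : Int) (lo hi : Nat) : Nat :=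
  if h : lo < hi then
    let mid := (lo + hi) / 2
    if P.getD mid 0 < t then bisectB P t (mid + 1) hi else bisectB P t lo mid
  else lo
termination_by hi - lo
decreasing_by all_goals omega

-- per-r body of Source B's second loop
def stepB (P : List Int) (k : Int) (ans : Int) (r : Nat) : Int :=
  ans + (((r : Int) + 1) - (bisectB P (P.getD (r + 1) 0 - k) 0 (r + 1) : Int))

def count_alt (s : String) (k : Int) : Int :=
  (List.range s.toList.length).foldl (stepB (prefB s.toList) k) 0

-- ===== PRECONDITION & SPEC =====
def Spec_count (s : String) (k : Int) (out : Int) : Prop := out = count_alt s k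
instance (s : String) (k : Int) (out : Int) : Decidable (Spec_count s k out) := by unfold Spec_count; infer_instance

-- ===== CLAIM (what is proved, stated in full; the proofs are below) =====
def Claim_equal_count : Prop := ∀ (s : String) (k : Int), Dom_count s k → Spec_count s k (count s k)

-- ===== LEMMAS AND PROOFS =====

-- number of '1's among the first i characters
def Pfun (cs : List Char) (i : Nat) : Int := ((cs.take i).countP (fun c => c == '1') : Nat)

lemma Pfun_mono (cs : List Char) {i j : Nat} (h : i ≤ j) : Pfun cs i ≤ Pfun cs j := by
  unfold Pfun
  have hsub : List.Sublist (cs.take i) (cs.take j) := by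
    have hp := List.take_prefix i (cs.take j)
    rw [List.take_take, Nat.min_eq_left h] at hp
    exact hp.sublist
  exact_mod_cast List.Sublist.countP_le hsub

lemma Pfun_succ (cs : List Char) {r : Nat} (hr : r < cs.length) :
    Pfun cs (r + 1) = Pfun cs r + (if cs.getD r ' ' = '1' then 1 else 0) := by
  unfold Pfun
  rw [List.take_add_one, List.countP_append, List.getElem?_eq_getElem hr]
  by_cases h : cs[r] = '1' <;>
    simp [List.getD, List.getElem?_eq_getElem hr, h]

lemma scanl_getD (cs : List Char) : ∀ (a : Int) (i : Nat), i ≤ cs.length →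
    (List.scanl (fun a c => a + (if c = '1' then 1 else 0)) a cs).getD i 0
      = a + ((cs.take i).countP (fun c => c == '1') : Nat) := by
  induction cs with
  | nil =>
      intro a i hi
      have h0 : i = 0 := by simpa using hi
      subst h0
      simp [List.scanl]
  | cons c t ih =>
      intro a i hi
      cases i with
      | zero => simp [List.scanl_cons]
      | succ i =>
          rw [List.scanl_cons, List.getD_cons_succ,
            ih (a + (if c = '1' then 1 else 0)) i (by simpa using hi),
            List.take_succ_cons, List.countP_cons]
          by_cases h : c = '1' <;> simp [h] <;> try ring

lemma prefB_getD (cs : List Char) {i : Nat} (hi : i ≤ cs.length) :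
    (prefB cs).getD i 0 = Pfun cs i := by
  unfold prefB Pfun
  rw [scanl_getD cs 0 i hi]; ring

-- the characterisation both A's final left pointer and B's bisect result satisfy
def Wp (cs : List Char) (k : Int) (r m : Nat) : Prop :=
  m ≤ r + 1 ∧ (∀ i < m, Pfun cs i < Pfun cs (r + 1) - k) ∧
    (m ≤ r → Pfun cs (r + 1) - k ≤ Pfun cs m)

lemma Wp_unique {cs : List Char} {k : Int} {r m₁ m₂ : Nat}
    (h₁ : Wp cs k r m₁) (h₂ : Wp cs k r m₂) : m₁ = m₂ := by
  unfold Wp at h₁ h₂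
  obtain ⟨h₁1, h₁2, h₁3⟩ := h₁
  obtain ⟨h₂1, h₂2, h₂3⟩ := h₂
  rcases lt_trichotomy m₁ m₂ with h | h | h
  · have ha := h₂2 m₁ h
    have hb := h₁3 (by omega)
    omega
  · exact h
  · have ha := h₁2 m₂ h
    have hb := h₂3 (by omega)
    omega

lemma shrinkA_spec (cs : List Char) (k : Int) (r : Nat) (hr : r < cs.length) :
    ∀ fuel l cnt, r + 1 - l ≤ fuel → l ≤ r + 1 →
      (∀ i < l, Pfun cs i < Pfun cs (r + 1) - k) →
      cnt = Pfun cs (r + 1) - Pfun cs l →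
      (shrinkA cs k r l cnt).2 = Pfun cs (r + 1) - Pfun cs (shrinkA cs k r l cnt).1 ∧
        Wp cs k r (shrinkA cs k r l cnt).1 := by
  intro fuel
  induction fuel with
  | zero =>
      intro l cnt hf hl hpre hcnt
      rw [shrinkA, dif_neg (by omega : ¬ (l ≤ r ∧ k < cnt))]
      show cnt = Pfun cs (r + 1) - Pfun cs l ∧ Wp cs k r l
      exact ⟨hcnt, hl, hpre, fun hlr => absurd hlr (by omega)⟩
  | succ fuel ih =>
      intro l cnt hf hl hpre hcnt
      rw [shrinkA]
      by_cases h : l ≤ r ∧ k < cnt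
      · rw [dif_pos h]
        have hPl : Pfun cs l < Pfun cs (r + 1) - k := by omega
        have hsucc := Pfun_succ cs (show l < cs.length by omega)
        have hcnt' : (if cs.getD l ' ' = '1' then cnt - 1 else cnt)
            = Pfun cs (r + 1) - Pfun cs (l + 1) := by
          by_cases hc : cs.getD l ' ' = '1'
          · rw [if_pos hc]; rw [if_pos hc] at hsucc; omega
          · rw [if_neg hc]; rw [if_neg hc] at hsucc; omega
        refine ih (l + 1) _ (by omega) (by omega) ?_ hcnt'
        intro i hi
        rcases Nat.lt_succ_iff_lt_or_eq.mp hi with hi | hi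
        · exact hpre i hi
        · subst hi; exact hPl
      · rw [dif_neg h]
        show cnt = Pfun cs (r + 1) - Pfun cs l ∧ Wp cs k r l
        refine ⟨hcnt, hl, hpre, fun hlr => ?_⟩
        have hnk : ¬ k < cnt := fun hk => h ⟨hlr, hk⟩
        omega

lemma bisectB_spec (cs : List Char) (t : Int) :
    ∀ fuel lo hi, hi - lo ≤ fuel → lo ≤ hi → hi ≤ cs.length →
      let m := bisectB (prefB cs) t lo hi
      lo ≤ m ∧ m ≤ hi ∧ (∀ i, lo ≤ i → i < m → Pfun cs i < t) ∧
        (m < hi → t ≤ Pfun cs m) := by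
  intro fuel
  induction fuel with
  | zero =>
      intro lo hi hf hlo hhi
      have : lo = hi := by omega
      subst this
      rw [bisectB, dif_neg (by omega)]
      exact ⟨le_refl _, le_refl _, fun i h1 h2 => by omega, by omega⟩
  | succ fuel ih =>
      intro lo hi hf hlo hhi
      rw [bisectB]
      by_cases h : lo < hi
      · rw [dif_pos h]
        have hmid1 : lo ≤ (lo + hi) / 2 := by omega
        have hmid2 : (lo + hi) / 2 < hi := by omega
        have hPmid : (prefB cs).getD ((lo + hi) / 2) 0 = Pfun cs ((lo + hi) / 2) :=
          prefB_getD cs (by omega)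
        by_cases hc : (prefB cs).getD ((lo + hi) / 2) 0 < t
        · rw [if_pos hc]
          obtain ⟨h1, h2, h3, h4⟩ := ih ((lo + hi) / 2 + 1) hi (by omega) (by omega) hhi
          refine ⟨by omega, h2, fun i hi1 hi2 => ?_, h4⟩
          by_cases hi3 : i ≤ (lo + hi) / 2
          · calc Pfun cs i ≤ Pfun cs ((lo + hi) / 2) := Pfun_mono cs hi3
              _ < t := by omega
          · exact h3 i (by omega) hi2
        · rw [if_neg hc]
          obtain ⟨h1, h2, h3, h4⟩ := ih lo ((lo + hi) / 2) (by omega) (by omega) (by omega)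
          refine ⟨h1, by omega, h3, fun hm => ?_⟩
          rcases Nat.lt_or_ge (bisectB (prefB cs) t lo ((lo + hi) / 2)) ((lo + hi) / 2) with hm' | hm'
          · exact h4 hm'
          · have : bisectB (prefB cs) t lo ((lo + hi) / 2) = (lo + hi) / 2 := by omega
            rw [this]; omega
      · rw [dif_neg h]
        exact ⟨le_refl _, by omega, fun i h1 h2 => by omega, by omega⟩

lemma bisectB_Wp (cs : List Char) (k : Int) {r : Nat} (hr : r < cs.length) :
    Wp cs k r (bisectB (prefB cs) (Pfun cs (r + 1) - k) 0 (r + 1)) := by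
  obtain ⟨h1, h2, h3, h4⟩ :=
    bisectB_spec cs (Pfun cs (r + 1) - k) (r + 1) 0 (r + 1) (by omega) (by omega) (by omega)
  exact ⟨h2, fun i hi => h3 i (by omega) hi, fun hm => h4 (by omega)⟩

-- joint invariant of the two folds over range j
lemma main_inv (cs : List Char) (k : Int) : ∀ j, j ≤ cs.length →
    let st := (List.range j).foldl (stepA cs k) (0, 0, 0)
    st.1 = (List.range j).foldl (stepB (prefB cs) k) 0 ∧
      st.2.1 ≤ j ∧ (∀ i < st.2.1, Pfun cs i < Pfun cs j - k) ∧
      st.2.2 = Pfun cs j - Pfun cs st.2.1 := by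
  intro j
  induction j with
  | zero => intro _; simp [Pfun]
  | succ j ih =>
      intro hj
      rw [List.range_succ, List.foldl_append, List.foldl_cons, List.foldl_nil,
        List.foldl_append, List.foldl_cons, List.foldl_nil]
      obtain ⟨ha, hl, hpre, hcnt⟩ := ih (by omega)
      set st := (List.range j).foldl (stepA cs k) (0, 0, 0) with hst
      have hjn : j < cs.length := by omega
      have hsucc := Pfun_succ cs hjn
      have hcnt' : (if cs.getD j ' ' = '1' then st.2.2 + 1 else st.2.2)
          = Pfun cs (j + 1) - Pfun cs st.2.1 := by
        by_cases hc : cs.getD j ' ' = '1'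
        · rw [if_pos hc]; rw [if_pos hc] at hsucc; omega
        · rw [if_neg hc]; rw [if_neg hc] at hsucc; omega
      have hpre' : ∀ i < st.2.1, Pfun cs i < Pfun cs (j + 1) - k := by
        intro i hi
        have h1 := Pfun_mono cs (Nat.le_succ j)
        have h2 := hpre i hi
        omega
      set p := shrinkA cs k j st.2.1 (if cs.getD j ' ' = '1' then st.2.2 + 1 else st.2.2)
        with hp
      obtain ⟨hs1, hs2⟩ := shrinkA_spec cs k j hjn (j + 1) st.2.1
        (if cs.getD j ' ' = '1' then st.2.2 + 1 else st.2.2) (by omega) (by omega)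
        hpre' hcnt'
      rw [← hp] at hs1 hs2
      have hbW := bisectB_Wp cs k hjn
      have hbeq : bisectB (prefB cs) (Pfun cs (j + 1) - k) 0 (j + 1) = p.1 :=
        Wp_unique hbW hs2
      have key : stepA cs k st j =
          (st.1 + ((j : Int) - (p.1 : Int) + 1), p.1, p.2) := rfl
      rw [key]
      refine ⟨?_, hs2.1, hs2.2.1, hs1⟩
      have sb : stepB (prefB cs) k ((List.range j).foldl (stepB (prefB cs) k) 0) j
          = (List.range j).foldl (stepB (prefB cs) k) 0 +
            (((j : Int) + 1) - (bisectB (prefB cs) ((prefB cs).getD (j + 1) 0 - k) 0 (j + 1) : Int)) := rfl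
      rw [sb, prefB_getD cs (show j + 1 ≤ cs.length by omega), hbeq, ha]
      ring

-- ===== VERDICT (by name: the statement is the Claim_ definition above) =====
theorem count_spec : Claim_equal_count := by
  intro s k _
  unfold Spec_count count count_alt
  obtain ⟨h, _⟩ := main_inv s.toList k s.toList.length (le_refl _)
  exact h
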